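-- pv_equiv track=rewrite | github.com/gauravxthakur/eval-view | evalview/commands/drift_cmd.py | _incident_markers
-- ===== SOURCE A (Python) =====
-- from typing import Any, Dict, List, Optional, Tuple
--
-- def _incident_markers(spark: str, incidents: List[int]) -> str:
--     """Return a marker row aligned with the sparkline.
--
--     A `!` glyph appears under (actually above — prints on the preceding
--     line) each sample where the status changed. Empty otherwise.
--     """
--     if not incidents:
--         return " " * len(spark)
--     chars = [" "] * len(spark)
--     for i in incidents:
--         if 0 <= i < len(chars):
--             chars[i] = "!"
--     return "".join(chars)
-- ===== SOURCE B (Python) =====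
-- from typing import List
--
-- def _incident_markers(spark: str, incidents: List[int]) -> str:
--     markers = set(incidents)
--     return ''.join('!' if i in markers else ' ' for i in range(len(spark)))
-- ===== Notes on version B (the rewrite author's own statement) =====
-- stated objective: idiomatic
-- what changed: Scatter-into-mutable-array over incidents replaced by a gather: one pass over output positions testing membership in a prebuilt set, dropping the empty-incidents special case.
import Mathlib
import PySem

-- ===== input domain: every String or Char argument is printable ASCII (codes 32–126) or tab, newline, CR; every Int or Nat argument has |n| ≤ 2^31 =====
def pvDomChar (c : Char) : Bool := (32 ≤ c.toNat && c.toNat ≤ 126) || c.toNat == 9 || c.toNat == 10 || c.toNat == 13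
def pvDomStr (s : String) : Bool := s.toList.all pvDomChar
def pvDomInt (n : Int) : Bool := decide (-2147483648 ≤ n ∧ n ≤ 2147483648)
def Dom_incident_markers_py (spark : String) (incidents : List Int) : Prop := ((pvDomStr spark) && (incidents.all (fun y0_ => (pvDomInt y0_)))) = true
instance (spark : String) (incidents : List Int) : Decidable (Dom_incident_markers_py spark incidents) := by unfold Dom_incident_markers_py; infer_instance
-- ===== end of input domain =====

-- B differs from A by gathering over output positions with a membership set instead of
-- scattering '!' into a mutable char array (objective: idiomatic; same cost).

-- ===== PORT A =====
-- loop body: if 0 <= i < len(chars): chars[i] = "!"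
-- (chars.set i.toNat is exact here because the branch guarantees 0 ≤ i < len)
def pvStep (chars : List Char) (i : Int) : List Char :=
  if 0 ≤ i ∧ i < (chars.length : Int) then chars.set i.toNat '!' else chars

def incident_markers_py (spark : String) (incidents : List Int) : String :=
  if incidents = [] then
    String.ofList (List.replicate spark.toList.length ' ')
  else
    String.ofList (incidents.foldl pvStep (List.replicate spark.toList.length ' '))

-- ===== PORT B =====
def incident_markers_py_alt (spark : String) (incidents : List Int) : String :=
  let markers : PySem.Set Int := PySem.Set.ofList incidents
  String.ofList ((List.range spark.toList.length).map
    (fun (i : Nat) => if (i : Int) ∈ markers then '!' else ' '))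

-- ===== PRECONDITION & SPEC =====
def Spec_incident_markers_py (spark : String) (incidents : List Int) (out : String) : Prop := out = incident_markers_py_alt spark incidents
instance (spark : String) (incidents : List Int) (out : String) : Decidable (Spec_incident_markers_py spark incidents out) := by unfold Spec_incident_markers_py; infer_instance

-- ===== CLAIM (what is proved, stated in full; the proofs are below) =====
def Claim_equal_incident_markers_py : Prop := ∀ (spark : String) (incidents : List Int), Dom_incident_markers_py spark incidents → Spec_incident_markers_py spark incidents (incident_markers_py spark incidents)

-- ===== LEMMAS AND PROOFS =====

theorem pvStep_length (chars : List Char) (i : Int) : (pvStep chars i).length = chars.length := by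
  unfold pvStep; split_ifs <;> simp

theorem pvFold_length (incidents : List Int) (cs : List Char) :
    (incidents.foldl pvStep cs).length = cs.length := by
  induction incidents generalizing cs with
  | nil => rfl
  | cons i rest ih => simpa [List.foldl, pvStep_length] using ih (pvStep cs i)

theorem pvFold_getD (incidents : List Int) (cs : List Char) (j : Nat) (hj : j < cs.length) :
    (incidents.foldl pvStep cs).getD j ' ' = if (j : Int) ∈ incidents then '!' else cs.getD j ' ' := by
  induction incidents generalizing cs with
  | nil => simp
  | cons i rest ih =>
    have hlen : (pvStep cs i).length = cs.length := pvStep_length cs i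
    rw [List.foldl_cons, ih (pvStep cs i) (by omega)]
    by_cases hm : (j : Int) ∈ rest
    · simp [hm, List.mem_cons]
    · simp only [hm, if_false, List.mem_cons]
      unfold pvStep
      by_cases hji : (j : Int) = i
      · have hg : 0 ≤ i ∧ i < (cs.length : Int) := by omega
        have hje : i.toNat = j := by omega
        simp [hg, hji, List.getD, hje, hj]
      · simp only [hji, false_or, if_false]
        split_ifs with hg
        · have hne : i.toNat ≠ j := by omega
          simp [List.getD, hne]
        · rfl

theorem pvMain (spark : String) (incidents : List Int) :
    incident_markers_py spark incidents = incident_markers_py_alt spark incidents := by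
  unfold incident_markers_py incident_markers_py_alt
  split_ifs with he
  · subst he
    congr 1
    apply List.ext_getElem (by simp)
    intro j h1 h2
    simp [PySem.Set.ofList]
  · congr 1
    have hlen : (incidents.foldl pvStep (List.replicate spark.toList.length ' ')).length
        = spark.toList.length := (pvFold_length incidents _).trans (by simp)
    apply List.ext_getElem (by simpa using hlen)
    intro j h1 h2
    have hx : j < spark.toList.length := by
      simpa using h2
    have hj : j < (List.replicate spark.toList.length ' ').length := by simpa using hx
    have hg := pvFold_getD incidents (List.replicate spark.toList.length ' ') j hj
    rw [← List.getD_eq_getElem _ ' ' h1, hg]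
    simp [PySem.Set.mem_ofList]

-- ===== VERDICT (by name: the statement is the Claim_ definition above) =====
theorem incident_markers_py_spec : Claim_equal_incident_markers_py := by
  intro spark incidents _
  exact pvMain spark incidents
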